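-- pv_equiv track=rewrite | github.com/hrshptl6595/DSA | isbn_checksums.py | checksums
-- ===== SOURCE A (Python) =====
-- def checksums(n):
-- 	temp = n
-- 	i=2
-- 	s=0
-- 	while (temp>0):
-- 		s+=((temp%10)*i)
-- 		temp = temp//10
-- 		i = i + 1
--
-- 	isbn = str(n)+str(11 - s%11)
-- 	return isbn
-- ===== SOURCE B (Python) =====
-- def checksums(n):
--     s = 0
--     if n > 0:
--         for i, ch in enumerate(reversed(str(n))):
--             s += (i + 2) * int(ch)
--     return str(n) + str(11 - s % 11)
-- ===== Notes on version B (the rewrite author's own statement) =====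
-- stated objective: idiomatic
-- what changed: B obtains the digit stream by iterating over the decimal string of n (enumerate over the reversed str(n)) instead of A's arithmetic digit peeling with mod/floor-division, accumulating the weighted sum in one pass over characters.
import Mathlib
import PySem

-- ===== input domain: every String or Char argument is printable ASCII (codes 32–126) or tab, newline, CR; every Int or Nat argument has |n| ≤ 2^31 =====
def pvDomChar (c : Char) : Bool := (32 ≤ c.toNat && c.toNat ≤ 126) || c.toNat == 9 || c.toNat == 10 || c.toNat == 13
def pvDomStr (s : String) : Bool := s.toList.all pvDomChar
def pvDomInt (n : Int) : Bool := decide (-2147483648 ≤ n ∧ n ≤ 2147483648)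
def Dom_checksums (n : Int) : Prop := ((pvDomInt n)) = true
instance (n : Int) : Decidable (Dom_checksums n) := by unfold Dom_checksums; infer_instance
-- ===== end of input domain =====

-- B changes A's arithmetic digit peeling (%10, //10) into a single pass over the
-- characters of str(n); objective: idiomatic, same cost.

-- ===== PORT A =====
-- the while loop: state (temp, i, s); terminates because temp.toNat strictly decreases
theorem checksumsLoop_dec (temp : Int) (h : 0 < temp) :
    (PySem.Int.floordiv temp 10).toNat < temp.toNat := by
  have : PySem.Int.floordiv temp 10 = temp / 10 :=
    Int.fdiv_eq_ediv_of_nonneg temp (by norm_num)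
  rw [this]
  omega

def checksumsLoop (temp i s : Int) : Int :=
  if h : temp > 0 then
    checksumsLoop (PySem.Int.floordiv temp 10) (i + 1) (s + (PySem.Int.mod temp 10) * i)
  else s
termination_by temp.toNat
decreasing_by exact checksumsLoop_dec temp h

def checksums (n : Int) : String :=
  let s := checksumsLoop n 2 0
  PySem.Int.toStr n ++ PySem.Int.toStr (11 - PySem.Int.mod s 11)

-- ===== PORT B =====
-- Source B: s = 0; if n > 0: for i, ch in enumerate(reversed(str(n))): s += (i+2)*int(ch)
-- int(ch) is ported as (ch.toNat : Int) - 48, exact for the decimal-digit characters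
-- that str(n) with n > 0 consists of.
def checksums_alt (n : Int) : String :=
  let s : Int :=
    if n > 0 then
      (PySem.List.enumerate (PySem.Int.toStr n).toList.reverse 0).foldl
        (fun s p => s + (p.1 + 2) * ((p.2.toNat : Int) - 48)) 0
    else 0
  PySem.Int.toStr n ++ PySem.Int.toStr (11 - PySem.Int.mod s 11)

-- ===== PRECONDITION & SPEC =====
def Spec_checksums (n : Int) (out : String) : Prop := out = checksums_alt n
instance (n : Int) (out : String) : Decidable (Spec_checksums n out) := by unfold Spec_checksums; infer_instance

-- ===== CLAIM (what is proved, stated in full; the proofs are below) =====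
def Claim_equal_checksums : Prop := ∀ (n : Int), Dom_checksums n → Spec_checksums n (checksums n)

-- ===== LEMMAS AND PROOFS =====

-- the weighted digit sum both programs compute, on Nat
def wsum (m : Nat) (i : Int) : Int :=
  if m = 0 then 0 else (m % 10 : Nat) * i + wsum (m / 10) (i + 1)
decreasing_by exact Nat.div_lt_self (by omega) (by omega)

theorem wsum_zero (i : Int) : wsum 0 i = 0 := by rw [wsum]; simp

theorem wsum_pos (m : Nat) (i : Int) (h : m ≠ 0) :
    wsum m i = ((m % 10 : Nat) : Int) * i + wsum (m / 10) (i + 1) := by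
  rw [wsum, if_neg h]

-- unfuelled decimal-digit list matching Nat.toDigitsCore's structure
def digs (m : Nat) : List Char :=
  if m / 10 = 0 then [Nat.digitChar (m % 10)]
  else digs (m / 10) ++ [Nat.digitChar (m % 10)]
decreasing_by exact Nat.div_lt_self (by omega) (by omega)

theorem digs_small (m : Nat) (h : m / 10 = 0) : digs m = [Nat.digitChar (m % 10)] := by
  rw [digs, if_pos h]

theorem digs_large (m : Nat) (h : m / 10 ≠ 0) :
    digs m = digs (m / 10) ++ [Nat.digitChar (m % 10)] := by
  rw [digs, if_neg h]

theorem toDigitsCore_eq_digs : ∀ (f m : Nat) (acc : List Char), m < f →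
    Nat.toDigitsCore 10 f m acc = digs m ++ acc := by
  intro f
  induction f with
  | zero => omega
  | succ f ih =>
    intro m acc hm
    rw [Nat.toDigitsCore]
    by_cases h0 : m / 10 = 0
    · simp [h0, digs_small m h0]
    · simp only [h0, if_false]
      rw [ih (m / 10) _ (by omega), digs_large m h0]
      simp

theorem toDigits_eq_digs (m : Nat) : Nat.toDigits 10 m = digs m :=
  (toDigitsCore_eq_digs (m + 1) m [] (by omega)).trans (by simp)

theorem digitChar_val (d : Nat) (hd : d < 10) : ((Nat.digitChar d).toNat : Int) - 48 = d := by
  interval_cases d <;> decide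

-- A's loop computes wsum
theorem checksumsLoop_eq_wsum (m : Nat) : ∀ (t i s : Int), t.toNat = m →
    checksumsLoop t i s = s + wsum m i := by
  induction m using Nat.strong_induction_on with
  | _ m ih =>
    intro t i s ht
    rw [checksumsLoop]
    by_cases hp : t > 0
    · have hfd : PySem.Int.floordiv t 10 = ((m / 10 : Nat) : Int) := by
        rw [PySem.Int.floordiv, Int.fdiv_eq_ediv_of_nonneg t (show (0:Int) ≤ 10 by norm_num)]
        omega
      have hmd : PySem.Int.mod t 10 = ((m % 10 : Nat) : Int) := by
        rw [PySem.Int.mod, Int.fmod_eq_emod_of_nonneg t (show (0:Int) ≤ 10 by norm_num)]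
        omega
      rw [dif_pos hp, hfd, hmd,
        ih (m / 10) (Nat.div_lt_self (by omega) (by omega)) _ _ _ (by omega),
        wsum_pos m i (by omega)]
      ring
    · rw [dif_neg hp, show m = 0 by omega, wsum_zero]
      ring

-- B's fold over the reversed digit string computes wsum
theorem foldl_digs (m : Nat) : ∀ (k : Nat) (acc : Int),
    (PySem.List.enumerate (digs m).reverse (k : Int)).foldl
      (fun s p => s + (p.1 + 2) * ((p.2.toNat : Int) - 48)) acc
    = acc + wsum m ((k : Int) + 2) := by
  induction m using Nat.strong_induction_on with
  | _ m ih =>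
    intro k acc
    by_cases h0 : m / 10 = 0
    · rw [digs_small m h0]
      simp only [List.reverse_singleton, PySem.List.enumerate_cons, PySem.List.enumerate_nil,
        List.foldl_cons, List.foldl_nil]
      rw [digitChar_val _ (by omega)]
      by_cases hm : m = 0
      · subst hm; rw [wsum_zero]; simp
      · rw [wsum_pos m _ hm, h0, wsum_zero]
        have : m % 10 = m := by omega
        ring
    · rw [digs_large m h0]
      simp only [List.reverse_append, List.reverse_singleton, List.singleton_append,
        PySem.List.enumerate_cons, List.foldl_cons]
      have hcast : (k : Int) + 1 = ((k + 1 : Nat) : Int) := by push_cast; ring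
      rw [digitChar_val _ (by omega), hcast,
        ih (m / 10) (Nat.div_lt_self (by omega) (by omega)) (k + 1),
        wsum_pos m _ (by omega)]
      push_cast
      ring

-- ===== VERDICT (by name: the statement is the Claim_ definition above) =====
theorem checksums_spec : Claim_equal_checksums := by
  intro n _
  unfold Spec_checksums checksums checksums_alt
  have hs : checksumsLoop n 2 0 =
      (if n > 0 then
        (PySem.List.enumerate (PySem.Int.toStr n).toList.reverse 0).foldl
          (fun s p => s + (p.1 + 2) * ((p.2.toNat : Int) - 48)) 0
      else (0 : Int)) := by
    by_cases hp : n > 0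
    · rw [if_pos hp]
      have htc : (PySem.Int.toStr n).toList = digs n.toNat := by
        rw [PySem.Int.toList_toStr, PySem.Int.toChars, if_neg (by omega : ¬ n < 0),
          toDigits_eq_digs]
      rw [htc]
      have h := foldl_digs n.toNat 0 0
      simp only [Nat.cast_zero] at h
      rw [h, checksumsLoop_eq_wsum n.toNat n 2 0 rfl]
      norm_num
    · rw [if_neg hp, checksumsLoop_eq_wsum 0 n 2 0 (by omega), wsum_zero]
      ring
  rw [hs]
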